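-- pv_equiv track=rewrite | github.com/manasdodya/python-practice | gfg-160-days/7-Two-Pointer-Technique/Bonus-7-Pair-sum-in-sorted-and-rotated-array.py | pairInSortedRotated
-- ===== SOURCE A (Python) =====
-- def pairInSortedRotated(arr, target):
--         #Your code here
--
--         n = len(arr)
--
--         if n < 2 :
--             return False
--
--         i = 0
--         for i in range(n-1):
--             if arr[i] > arr[i+1]:
--                 break
--
--         if arr[i] <= arr[i+1]:
--             i += 1
--
--         l = (i + 1) % n
--         r = i
--
--         while l != r:
--             curr_sum = arr[l] + arr[r]
--
--             if curr_sum == target: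
--                 return True
--
--             elif curr_sum < target:
--                 l = (l + 1) % n
--
--             else:
--                 r = (r - 1 + n) % n
--
--         return False
-- ===== SOURCE B (Python) =====
-- def pairInSortedRotated(arr, target):
--     # Standard hash-set two-sum: one pass, no use of the sorted/rotated structure.
--     seen = set()
--     for x in arr:
--         if target - x in seen:
--             return True
--         seen.add(x)
--     return False
-- ===== Notes on version B (the rewrite author's own statement) =====
-- stated objective: idiomatic
-- what changed: Replaces the pivot search plus cyclic two-pointer walk with a single-pass hash-set two-sum that ignores the sorted/rotated structure entirely.
-- outside the precondition, e.g. on pairInSortedRotated([-2, 0, -1], -2): A returns False, B returns True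
import Mathlib
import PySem

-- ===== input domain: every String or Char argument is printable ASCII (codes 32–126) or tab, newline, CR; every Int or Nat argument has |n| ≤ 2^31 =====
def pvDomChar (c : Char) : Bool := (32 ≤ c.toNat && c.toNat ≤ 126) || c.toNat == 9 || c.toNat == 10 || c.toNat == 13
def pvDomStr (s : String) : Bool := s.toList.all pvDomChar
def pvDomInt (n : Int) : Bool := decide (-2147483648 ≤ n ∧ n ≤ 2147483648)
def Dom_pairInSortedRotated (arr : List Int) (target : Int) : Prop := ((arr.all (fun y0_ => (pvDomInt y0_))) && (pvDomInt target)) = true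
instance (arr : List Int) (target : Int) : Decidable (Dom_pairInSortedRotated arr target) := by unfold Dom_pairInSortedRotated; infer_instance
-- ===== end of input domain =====

-- B replaces the pivot search plus cyclic two-pointer walk with a one-pass
-- hash-set two-sum (idiomatic; same O(n) cost; ignores the rotated structure).


-- ===== PORT A =====
-- 'for i in range(n-1): if arr[i] > arr[i+1]: break' with n ≥ 2: first index
-- i < last (= n-2) with arr[i] > arr[i+1], else last (the leaked loop variable;
-- Python's test at i = last cannot change the leaked value).  arr[k] is
-- arr.getD k 0: every index A dereferences is provably in range (n ≥ 2, % n).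
def pvDescIdx (arr : List Int) (i last : Nat) : Nat :=
  if _h : i < last then
    (if arr.getD (i+1) 0 < arr.getD i 0 then i else pvDescIdx arr (i+1) last)
  else i
termination_by last - i

-- 'while l != r: …'; each step shrinks the cyclic gap (r - l) % n by one, so
-- fuel = n (initial gap is n-1) is never exhausted.  (r - 1 + n) % n is
-- (r + n - 1) % n in Nat (r ≥ 0, n ≥ 1: identical values).
def pvTpLoop (arr : List Int) (target : Int) (n l r : Nat) : Nat → Bool
  | 0 => false
  | fuel + 1 =>
    if l = r then false
    else
      let currSum := arr.getD l 0 + arr.getD r 0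
      if currSum = target then true
      else if currSum < target then pvTpLoop arr target n ((l + 1) % n) r fuel
      else pvTpLoop arr target n l ((r + n - 1) % n) fuel

def pairInSortedRotated (arr : List Int) (target : Int) : Bool :=
  let n := arr.length
  if n < 2 then false
  else
    let i := pvDescIdx arr 0 (n - 2)
    let i' := if arr.getD i 0 ≤ arr.getD (i+1) 0 then i + 1 else i
    let l := (i' + 1) % n
    let r := i'
    pvTpLoop arr target n l r n

-- ===== PORT B =====
def pvTwoSum (target : Int) (seen : PySem.Set Int) : List Int → Bool
  | [] => false
  | x :: xs =>
    if PySem.Set.contains seen (target - x) then true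
    else pvTwoSum target (PySem.Set.add seen x) xs

def pairInSortedRotated_alt (arr : List Int) (target : Int) : Bool :=
  pvTwoSum target PySem.Set.empty arr

-- ===== PRECONDITION & SPEC =====
-- Pre_ admits every arr that is a rotation of a sorted list (the function's
-- stated domain) and, beyond that, every input with no distinct-index pair
-- summing to target (both programs return False there); it excludes only
-- non-rotated-sorted arrays that do contain such a pair, where A's two-pointer
-- verdict is an accident of its traversal order.
def Pre_pairInSortedRotated (arr : List Int) (target : Int) : Prop :=
  (∃ k ≤ arr.length, (arr.rotate k).Pairwise (· ≤ ·)) ∨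
  (∀ i < arr.length, ∀ j < arr.length, i ≠ j → arr.getD i 0 + arr.getD j 0 ≠ target)
instance (arr : List Int) (target : Int) : Decidable (Pre_pairInSortedRotated arr target) := by
  unfold Pre_pairInSortedRotated; infer_instance

def pvWitness_pairInSortedRotated : List Int × Int := ([3, 4, 1, 2], 5)

def Spec_pairInSortedRotated (arr : List Int) (target : Int) (out : Bool) : Prop := out = pairInSortedRotated_alt arr target
instance (arr : List Int) (target : Int) (out : Bool) : Decidable (Spec_pairInSortedRotated arr target out) := by unfold Spec_pairInSortedRotated; infer_instance

-- ===== CLAIM (what is proved, stated in full; the proofs are below) =====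
def Claim_equal_pairInSortedRotated : Prop := ∀ (arr : List Int) (target : Int), Dom_pairInSortedRotated arr target → Pre_pairInSortedRotated arr target → Spec_pairInSortedRotated arr target (pairInSortedRotated arr target)

-- ===== LEMMAS AND PROOFS =====

-- "arr has a pair of distinct indices summing to target" (the negation of
-- Pre_'s second disjunct).
def HasPair (arr : List Int) (t : Int) : Prop :=
  ∃ i j, i < arr.length ∧ j < arr.length ∧ i ≠ j ∧ arr.getD i 0 + arr.getD j 0 = t

theorem twoSum_iff (t : Int) (xs : List Int) : ∀ (seen : PySem.Set Int),
    (pvTwoSum t seen xs = true ↔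
      ∃ j, j < xs.length ∧
        ((t - xs.getD j 0) ∈ seen ∨ ∃ i, i < j ∧ xs.getD i 0 + xs.getD j 0 = t)) := by
  induction xs with
  | nil => intro seen; simp [pvTwoSum]
  | cons x xs ih =>
    intro seen
    simp only [pvTwoSum]
    by_cases hc : PySem.Set.contains seen (t - x) = true
    · simp only [hc, if_true]
      constructor
      · intro _
        refine ⟨0, by simp, Or.inl ?_⟩
        simpa [PySem.Set.contains] using hc
      · intro _; trivial
    · rw [if_neg hc, ih]
      constructor
      · rintro ⟨j, hj, h⟩
        refine ⟨j + 1, by simpa using hj, ?_⟩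
        rcases h with hmem | ⟨i, hi, hsum⟩
        · rcases (PySem.Set.mem_add seen x _).1 hmem with h' | h'
          · exact Or.inl (by simpa using h')
          · refine Or.inr ⟨0, by omega, ?_⟩
            simp only [List.getD_cons_zero, List.getD_cons_succ]
            omega
        · exact Or.inr ⟨i + 1, by omega, by simpa using hsum⟩
      · rintro ⟨j, hj, h⟩
        match j with
        | 0 =>
          rcases h with hmem | ⟨i, hi, _⟩
          · exact absurd (by simpa [PySem.Set.contains] using hmem) hc
          · omega
        | j + 1 =>
          refine ⟨j, by simpa using hj, ?_⟩
          rcases h with hmem | ⟨i, hi, hsum⟩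
          · exact Or.inl ((PySem.Set.mem_add seen x _).2 (Or.inl (by simpa using hmem)))
          · match i with
            | 0 =>
              refine Or.inl ((PySem.Set.mem_add seen x _).2 (Or.inr ?_))
              simp only [List.getD_cons_zero, List.getD_cons_succ] at hsum
              omega
            | i + 1 => exact Or.inr ⟨i, by omega, by simpa using hsum⟩


theorem alt_iff_hasPair (arr : List Int) (t : Int) :
    pairInSortedRotated_alt arr t = true ↔ HasPair arr t := by
  unfold pairInSortedRotated_alt HasPair
  rw [twoSum_iff]
  constructor
  · rintro ⟨j, hj, h | ⟨i, hi, hsum⟩⟩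
    · simp [PySem.Set.empty] at h
    · exact ⟨i, j, by omega, hj, by omega, hsum⟩
  · rintro ⟨i, j, hi, hj, hij, hsum⟩
    rcases Nat.lt_or_ge i j with h | h
    · exact ⟨j, hj, Or.inr ⟨i, h, hsum⟩⟩
    · exact ⟨i, hi, Or.inr ⟨j, by omega, by omega⟩⟩


theorem tp_sound (arr : List Int) (t : Int) : ∀ (fuel l r : Nat),
    l < arr.length → r < arr.length →
    pvTpLoop arr t arr.length l r fuel = true → HasPair arr t := by
  intro fuel
  induction fuel with
  | zero => intro l r _ _ h; simp [pvTpLoop] at h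
  | succ fuel ih =>
    intro l r hl hr h
    have hn : 0 < arr.length := by omega
    simp only [pvTpLoop] at h
    by_cases hlr : l = r
    · simp [hlr] at h
    · rw [if_neg hlr] at h
      by_cases hsum : arr.getD l 0 + arr.getD r 0 = t
      · exact ⟨l, r, hl, hr, hlr, hsum⟩
      · rw [if_neg hsum] at h
        by_cases hlt : arr.getD l 0 + arr.getD r 0 < t
        · rw [if_pos hlt] at h
          exact ih _ _ (Nat.mod_lt _ hn) hr h
        · rw [if_neg hlt] at h
          exact ih _ _ hl (Nat.mod_lt _ hn) h


theorem descIdx_le (arr : List Int) : ∀ (i last : Nat), i ≤ last → pvDescIdx arr i last ≤ last := by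
  intro i last hi
  fun_induction pvDescIdx arr i last with
  | case1 i h hdesc => omega
  | case2 i h hdesc ih => exact ih (by omega)
  | case3 i h => omega


theorem descIdx_spec (arr : List Int) : ∀ (i last : Nat), i ≤ last →
    (∀ m, m < i → ¬ arr.getD (m+1) 0 < arr.getD m 0) →
    ((∀ m, m < pvDescIdx arr i last → ¬ arr.getD (m+1) 0 < arr.getD m 0) ∧
     (pvDescIdx arr i last = last ∨ arr.getD ((pvDescIdx arr i last)+1) 0 < arr.getD (pvDescIdx arr i last) 0)) := by
  intro i last hle hpre
  fun_induction pvDescIdx arr i last with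
  | case1 i h hdesc => exact ⟨hpre, Or.inr hdesc⟩
  | case2 i h hdesc ih =>
    exact ih (by omega) (fun m hm => by
      rcases Nat.lt_or_ge m i with h' | h'
      · exact hpre m h'
      · have hmi : m = i := by omega
        subst hmi; exact hdesc)
  | case3 i h =>
    have hil : i = last := by omega
    subst hil
    exact ⟨hpre, Or.inl rfl⟩


theorem a_sound (arr : List Int) (t : Int) :
    pairInSortedRotated arr t = true → HasPair arr t := by
  intro h
  unfold pairInSortedRotated at h
  by_cases hn : arr.length < 2
  · simp [hn] at h
  · rw [if_neg hn] at h
    have hd : pvDescIdx arr 0 (arr.length - 2) ≤ arr.length - 2 :=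
      descIdx_le arr 0 _ (by omega)
    set i' := if arr.getD (pvDescIdx arr 0 (arr.length - 2)) 0 ≤ arr.getD ((pvDescIdx arr 0 (arr.length - 2))+1) 0
      then pvDescIdx arr 0 (arr.length - 2) + 1 else pvDescIdx arr 0 (arr.length - 2) with hi'
    have hi'lt : i' < arr.length := by
      rw [hi']; split <;> omega
    exact tp_sound arr t _ _ _ (Nat.mod_lt _ (by omega)) hi'lt h


theorem rot_getD (arr : List Int) (l0 a : Nat) (ha : a < arr.length) :
    (arr.rotate l0).getD a 0 = arr.getD ((a + l0) % arr.length) 0 := by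
  have h1 : a < (arr.rotate l0).length := by rw [List.length_rotate]; exact ha
  have h2 : (a + l0) % arr.length < arr.length := Nat.mod_lt _ (by omega)
  rw [List.getD_eq_getElem _ _ h1, List.getD_eq_getElem _ _ h2, List.getElem_rotate]


theorem rotate_sorted_of_desc (arr : List Int) (k d : Nat)
    (hk : (arr.rotate k).Pairwise (· ≤ ·)) (hd1 : d + 1 < arr.length)
    (hd : arr.getD (d+1) 0 < arr.getD d 0) :
    (arr.rotate (d+1)).Pairwise (· ≤ ·) := by
  set n := arr.length with hn
  have hn2 : 2 ≤ n := by omega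
  have hkn : k % n < n := Nat.mod_lt _ (by omega)
  have hkmod : k % n = d + 1 := by
    by_contra hne
    set m := (d + n - k % n) % n with hm
    have hmlt : m < n := Nat.mod_lt _ (by omega)
    have hmd : (m + k) % n = d := by
      rw [← Nat.add_mod_mod, hm, Nat.mod_add_mod]
      have e : d + n - k % n + k % n = d + n := by omega
      rw [e, Nat.add_mod_right, Nat.mod_eq_of_lt (by omega)]
    have hm1 : m + 1 < n := by
      by_contra hge
      have hmeq : m = n - 1 := by omega
      rw [hmeq, ← Nat.add_mod_mod] at hmd
      rcases Nat.eq_zero_or_pos (k % n) with h0 | h0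
      · rw [h0, Nat.add_zero, Nat.mod_eq_of_lt (by omega)] at hmd
        omega
      · have e : n - 1 + k % n = (k % n - 1) + n := by omega
        rw [e, Nat.add_mod_right, Nat.mod_eq_of_lt (by omega)] at hmd
        omega
    have hmd1 : (m + 1 + k) % n = d + 1 := by
      have e1 : m + 1 + k = m + k + 1 := by ring
      rw [e1, ← Nat.mod_add_mod, hmd]
      exact Nat.mod_eq_of_lt (by omega)
    have hpw := List.pairwise_iff_getElem.1 hk m (m+1)
      (by rw [List.length_rotate, ← hn]; omega) (by rw [List.length_rotate, ← hn]; omega) (by omega)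
    rw [List.getElem_rotate, List.getElem_rotate] at hpw
    have hpw2 : arr.getD ((m + k) % n) 0 ≤ arr.getD ((m + 1 + k) % n) 0 := by
      rw [List.getD_eq_getElem _ _ (Nat.mod_lt _ (by omega)),
          List.getD_eq_getElem _ _ (Nat.mod_lt _ (by omega))]
      exact hpw
    rw [hmd, hmd1] at hpw2
    omega
  have e : arr.rotate (d+1) = arr.rotate k := by
    rw [← List.rotate_mod arr k, ← hn, hkmod]
  rw [e]; exact hk


theorem tp_complete (arr : List Int) (t : Int) (l0 : Nat) (hl0 : l0 < arr.length)
    (hs : (arr.rotate l0).Pairwise (· ≤ ·)) : ∀ (fuel a b : Nat),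
    b < arr.length → b - a < fuel →
    (∃ i j, a ≤ i ∧ i < j ∧ j ≤ b ∧
      (arr.rotate l0).getD i 0 + (arr.rotate l0).getD j 0 = t) →
    pvTpLoop arr t arr.length ((a + l0) % arr.length) ((b + l0) % arr.length) fuel = true := by
  intro fuel
  induction fuel with
  | zero =>
    rintro a b hb hfuel ⟨i, j, hai, hij, hjb, _⟩
    omega
  | succ fuel ih =>
    rintro a b hb hfuel ⟨i, j, hai, hij, hjb, hsum⟩
    have hn : 0 < arr.length := by omega
    have hab : a < b := by omega
    have hlr : (a + l0) % arr.length ≠ (b + l0) % arr.length := by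
      intro h
      have h1 : (a + l0) % arr.length = (b + l0) % arr.length := h
      have h2 : a % arr.length = b % arr.length := by
        have := Nat.ModEq.add_right_cancel' l0 (h1 : (a + l0) ≡ (b + l0) [MOD arr.length])
        exact this
      rw [Nat.mod_eq_of_lt (by omega), Nat.mod_eq_of_lt hb] at h2
      omega
    -- sortedness in getD form
    have hmono : ∀ p q : Nat, p ≤ q → q < arr.length →
        (arr.rotate l0).getD p 0 ≤ (arr.rotate l0).getD q 0 := by
      intro p q hpq hq
      rcases Nat.eq_or_lt_of_le hpq with h | h
      · rw [h]
      · have := List.pairwise_iff_getElem.1 hs p q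
          (by rw [List.length_rotate]; omega) (by rw [List.length_rotate]; omega) h
        rw [List.getD_eq_getElem _ _ (by rw [List.length_rotate]; omega),
            List.getD_eq_getElem _ _ (by rw [List.length_rotate]; omega)]
        exact this
    have hga : arr.getD ((a + l0) % arr.length) 0 = (arr.rotate l0).getD a 0 :=
      (rot_getD arr l0 a (by omega)).symm
    have hgb : arr.getD ((b + l0) % arr.length) 0 = (arr.rotate l0).getD b 0 :=
      (rot_getD arr l0 b hb).symm
    simp only [pvTpLoop, if_neg hlr]
    by_cases heq : arr.getD ((a + l0) % arr.length) 0 + arr.getD ((b + l0) % arr.length) 0 = t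
    · rw [if_pos heq]
    · rw [if_neg heq]
      by_cases hlt : arr.getD ((a + l0) % arr.length) 0 + arr.getD ((b + l0) % arr.length) 0 < t
      · rw [if_pos hlt]
        -- the pair cannot start at a
        have hia : i ≠ a := by
          intro h; subst h
          have hjb' : (arr.rotate l0).getD j 0 ≤ (arr.rotate l0).getD b 0 := hmono j b hjb hb
          rw [hga, hgb] at hlt
          omega
        have harg : ((a + l0) % arr.length + 1) % arr.length = (a + 1 + l0) % arr.length := by
          rw [Nat.mod_add_mod]
          ring_nf
        rw [harg]
        exact ih (a+1) b hb (by omega) ⟨i, j, by omega, hij, hjb, hsum⟩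
      · rw [if_neg hlt]
        have hgt : t < arr.getD ((a + l0) % arr.length) 0 + arr.getD ((b + l0) % arr.length) 0 := by
          omega
        have hjb' : j ≠ b := by
          intro h; subst h
          have hai' : (arr.rotate l0).getD a 0 ≤ (arr.rotate l0).getD i 0 := hmono a i hai (by omega)
          rw [hga, hgb] at hgt
          omega
        have harg : ((b + l0) % arr.length + arr.length - 1) % arr.length
            = (b - 1 + l0) % arr.length := by
          have e1 : (b + l0) % arr.length + arr.length - 1
              = (b + l0) % arr.length + (arr.length - 1) := by omega
          rw [e1, Nat.mod_add_mod]
          have e2 : b + l0 + (arr.length - 1) = (b - 1 + l0) + arr.length := by omega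
          rw [e2, Nat.add_mod_right]
        rw [harg]
        exact ih a (b-1) (by omega) (by omega) ⟨i, j, hai, hij, by omega, hsum⟩


theorem a_complete_core (arr : List Int) (t : Int) (i' : Nat)
    (hn2 : 2 ≤ arr.length) (hi' : i' < arr.length)
    (hsrt : (arr.rotate ((i' + 1) % arr.length)).Pairwise (· ≤ ·))
    (hp : HasPair arr t) :
    pvTpLoop arr t arr.length ((i' + 1) % arr.length) i' arr.length = true := by
  set n := arr.length with hn
  set l0 := (i' + 1) % n with hl0def
  have hl0 : l0 < n := Nat.mod_lt _ (by omega)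
  have hr : (n - 1 + l0) % n = i' := by
    rcases Nat.eq_or_lt_of_le (Nat.succ_le_of_lt hi') with h | h
    · -- i' + 1 = n, l0 = 0
      have : l0 = 0 := by rw [hl0def, ← h, Nat.mod_self]
      rw [this, Nat.add_zero, Nat.mod_eq_of_lt (by omega)]
      omega
    · have : l0 = i' + 1 := by rw [hl0def]; exact Nat.mod_eq_of_lt (by omega)
      rw [this]
      have e : n - 1 + (i' + 1) = i' + n := by omega
      rw [e, Nat.add_mod_right]
      exact Nat.mod_eq_of_lt hi'
  rcases hp with ⟨p, q, hpn, hqn, hpq, hsum⟩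
  -- indices of p, q inside the rotated (sorted) view
  have key : ∀ x, x < n → ((x + n - l0) % n + l0) % n = x := by
    intro x hx
    rw [Nat.mod_add_mod]
    have e : x + n - l0 + l0 = x + n := by omega
    rw [e, Nat.add_mod_right]
    exact Nat.mod_eq_of_lt hx
  set ap := (p + n - l0) % n with hap
  set aq := (q + n - l0) % n with haq
  have hapn : ap < n := Nat.mod_lt _ (by omega)
  have haqn : aq < n := Nat.mod_lt _ (by omega)
  have hgp : (arr.rotate l0).getD ap 0 = arr.getD p 0 := by
    rw [rot_getD arr l0 ap (by omega), key p hpn]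
  have hgq : (arr.rotate l0).getD aq 0 = arr.getD q 0 := by
    rw [rot_getD arr l0 aq (by omega), key q hqn]
  have hne : ap ≠ aq := by
    intro h
    apply hpq
    have h1 := key p hpn
    have h2 := key q hqn
    rw [← hap] at h1
    rw [← haq] at h2
    rw [h, h2] at h1
    omega
  have main := tp_complete arr t l0 hl0 hsrt n 0 (n-1) (by omega) (by omega)
  have hpair : ∃ i j, 0 ≤ i ∧ i < j ∧ j ≤ n - 1 ∧
      (arr.rotate l0).getD i 0 + (arr.rotate l0).getD j 0 = t := by
    rcases Nat.lt_or_ge ap aq with h | h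
    · exact ⟨ap, aq, by omega, h, by omega, by rw [hgp, hgq]; exact hsum⟩
    · exact ⟨aq, ap, by omega, by omega, by omega, by rw [hgq, hgp]; omega⟩
  have := main hpair
  rw [Nat.zero_add, Nat.mod_eq_of_lt hl0, hr] at this
  exact this

theorem a_complete (arr : List Int) (t : Int)
    (hrot : ∃ k ≤ arr.length, (arr.rotate k).Pairwise (· ≤ ·))
    (hp : HasPair arr t) : pairInSortedRotated arr t = true := by
  obtain ⟨k, _hk, hks⟩ := hrot
  have hn2 : 2 ≤ arr.length := by
    rcases hp with ⟨i, j, hi, hj, hij, _⟩; omega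
  unfold pairInSortedRotated
  rw [if_neg (by omega : ¬ arr.length < 2)]
  set res := pvDescIdx arr 0 (arr.length - 2) with hres
  show (pvTpLoop arr t arr.length
      (((if arr.getD res 0 ≤ arr.getD (res+1) 0 then res + 1 else res) + 1) % arr.length)
      (if arr.getD res 0 ≤ arr.getD (res+1) 0 then res + 1 else res) arr.length) = true
  have hresle : res ≤ arr.length - 2 := descIdx_le arr 0 _ (by omega)
  have hspec := descIdx_spec arr 0 (arr.length - 2) (by omega)
    (fun m hm => absurd hm (Nat.not_lt_zero m))
  rw [← hres] at hspec
  by_cases hc : arr.getD res 0 ≤ arr.getD (res+1) 0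
  · rw [if_pos hc]
    have hres2 : res = arr.length - 2 := by
      rcases hspec.2 with h | h
      · exact h
      · omega
    have hch : arr.Pairwise (· ≤ ·) := by
      apply List.IsChain.pairwise
      rw [List.isChain_iff_getElem]
      intro m hm
      have hnd : ¬ arr.getD (m+1) 0 < arr.getD m 0 := by
        rcases Nat.lt_or_ge m res with h | h
        · exact hspec.1 m h
        · have hmr : m = res := by omega
          subst hmr; omega
      rw [List.getD_eq_getElem _ _ (by omega : m < arr.length),
          List.getD_eq_getElem _ _ hm] at hnd
      omega
    apply a_complete_core arr t (res+1) hn2 (by omega) ?_ hp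
    have e : (res + 1 + 1) % arr.length = 0 := by
      have e2 : res + 1 + 1 = arr.length := by omega
      rw [e2, Nat.mod_self]
    rw [e, List.rotate_zero]
    exact hch
  · rw [if_neg hc]
    have hdesc : arr.getD (res+1) 0 < arr.getD res 0 := by omega
    have hsrt := rotate_sorted_of_desc arr k res hks (by omega) hdesc
    apply a_complete_core arr t res hn2 (by omega) ?_ hp
    have e : (res + 1) % arr.length = res + 1 := Nat.mod_eq_of_lt (by omega)
    rw [e]
    exact hsrt

-- ===== VERDICT (by name: the statement is the Claim_ definition above) =====
theorem pairInSortedRotated_spec : Claim_equal_pairInSortedRotated := by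
  intro arr t _hdom hpre
  unfold Spec_pairInSortedRotated
  by_cases hp : HasPair arr t
  · have hrot : ∃ k ≤ arr.length, (arr.rotate k).Pairwise (· ≤ ·) := by
      rcases hpre with h | h
      · exact h
      · exfalso
        rcases hp with ⟨i, j, hi, hj, hij, hsum⟩
        exact h i hi j hj hij hsum
    rw [a_complete arr t hrot hp, (alt_iff_hasPair arr t).2 hp]
  · have ha : pairInSortedRotated arr t = false := by
      cases h : pairInSortedRotated arr t
      · rfl
      · exact absurd (a_sound arr t h) hp
    have hb : pairInSortedRotated_alt arr t = false := by
      cases h : pairInSortedRotated_alt arr t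
      · rfl
      · exact absurd ((alt_iff_hasPair arr t).1 h) hp
    rw [ha, hb]
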